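-- pv_equiv track=rewrite | github.com/stasizb/AuctionScraper | build_workbook.py | _build_headers
-- ===== SOURCE A (Python) =====
-- LAST_PRICE_COL  = "Last Price"
--
-- PRICE_COL       = "Price"
--
-- VIN_COL         = "VIN"
--
-- def _build_headers(csv_fieldnames: list[str]) -> list[str]:
--     """Build output column list.
--
--     - If CSV has 'Last Price' (bidcars format): remove it, insert Price after
--       Odometer, append VIN at end.
--     - If CSV already has 'Price'/'VIN' (bidfax format): return as-is.
--     """
--     if LAST_PRICE_COL in csv_fieldnames:
--         cols = [c for c in csv_fieldnames if c != LAST_PRICE_COL]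
--         insert_at = cols.index("Odometer") + 1 if "Odometer" in cols else len(cols)
--         cols.insert(insert_at, PRICE_COL)
--         if VIN_COL not in cols:
--             cols.append(VIN_COL)
--         return cols
--     return list(csv_fieldnames)
-- ===== SOURCE B (Python) =====
-- LAST_PRICE_COL  = "Last Price"
--
-- PRICE_COL       = "Price"
--
-- VIN_COL         = "VIN"
--
-- def _build_headers(csv_fieldnames: list[str]) -> list[str]:
--     """Single-pass rebuild: skip 'Last Price', drop 'Price' in right after the
--     first 'Odometer' (or at the end if none), then add VIN if missing."""
--     if LAST_PRICE_COL not in csv_fieldnames: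
--         return list(csv_fieldnames)
--     out = []
--     placed = False
--     for c in csv_fieldnames:
--         if c == LAST_PRICE_COL:
--             continue
--         out.append(c)
--         if not placed and c == "Odometer":
--             out.append(PRICE_COL)
--             placed = True
--     if not placed:
--         out.append(PRICE_COL)
--     if VIN_COL not in out:
--         out.append(VIN_COL)
--     return out
-- ===== Notes on version B (the rewrite author's own statement) =====
-- stated objective: simpler
-- what changed: Replaces filter + index + insert + membership-insert (three separate scans over the column list) with one left-to-right pass that skips 'Last Price' and emits 'Price' right after the first 'Odometer' via a one-shot flag.
import Mathlib
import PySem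

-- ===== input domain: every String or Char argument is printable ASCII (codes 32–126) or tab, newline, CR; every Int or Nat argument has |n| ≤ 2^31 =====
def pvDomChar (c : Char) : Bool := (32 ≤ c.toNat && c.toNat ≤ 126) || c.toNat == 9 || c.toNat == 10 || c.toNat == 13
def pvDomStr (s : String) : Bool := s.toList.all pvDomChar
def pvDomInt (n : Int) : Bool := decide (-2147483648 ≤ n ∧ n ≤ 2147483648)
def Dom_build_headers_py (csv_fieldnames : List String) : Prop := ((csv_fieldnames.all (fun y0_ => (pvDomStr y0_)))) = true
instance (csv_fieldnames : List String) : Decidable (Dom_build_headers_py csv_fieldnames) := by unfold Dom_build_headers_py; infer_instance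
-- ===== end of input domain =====

-- B replaces A's filter + index + insert + membership-append with one single pass using a one-shot flag; objective: simpler.

-- ===== PORT A =====
-- [c for c in csv_fieldnames if c != LAST_PRICE_COL]
def pvFilter (xs : List String) : List String := xs.filter (fun c => c ≠ "Last Price")

def build_headers_py (csv_fieldnames : List String) : List String :=
  if "Last Price" ∈ csv_fieldnames then
    let cols := pvFilter csv_fieldnames
    -- cols.index("Odometer") + 1 if "Odometer" in cols else len(cols)
    let insert_at : Nat :=
      if "Odometer" ∈ cols then (PySem.List.index? cols "Odometer").getD 0 + 1 else cols.length
    let cols := PySem.List.insert cols (insert_at : Int) "Price"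
    if "VIN" ∈ cols then cols else cols ++ ["VIN"]
  else csv_fieldnames

-- ===== PORT B =====
def pvStep (st : List String × Bool) (c : String) : List String × Bool :=
  if c = "Last Price" then st
  else if !st.2 && c = "Odometer" then (st.1 ++ [c, "Price"], true)
  else (st.1 ++ [c], st.2)

def build_headers_py_alt (csv_fieldnames : List String) : List String :=
  if "Last Price" ∉ csv_fieldnames then csv_fieldnames
  else
    let st := csv_fieldnames.foldl pvStep ([], false)
    let out := if st.2 then st.1 else st.1 ++ ["Price"]
    if "VIN" ∈ out then out else out ++ ["VIN"]

-- ===== PRECONDITION & SPEC =====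
def Spec_build_headers_py (csv_fieldnames : List String) (out : List String) : Prop := out = build_headers_py_alt csv_fieldnames
instance (csv_fieldnames : List String) (out : List String) : Decidable (Spec_build_headers_py csv_fieldnames out) := by unfold Spec_build_headers_py; infer_instance

-- ===== CLAIM (what is proved, stated in full; the proofs are below) =====
def Claim_equal_build_headers_py : Prop := ∀ (csv_fieldnames : List String), Dom_build_headers_py csv_fieldnames → Spec_build_headers_py csv_fieldnames (build_headers_py csv_fieldnames)

-- ===== LEMMAS AND PROOFS =====

-- "Price" inserted right after the first "Odometer" — the common form both sides reduce to
def insAfterOdo : List String → List String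
  | [] => []
  | c :: cs => if c = "Odometer" then c :: "Price" :: cs else c :: insAfterOdo cs

theorem pvFilter_nil : pvFilter [] = [] := rfl

theorem pvFilter_cons (c : String) (cs : List String) :
    pvFilter (c :: cs) = if c = "Last Price" then pvFilter cs else c :: pvFilter cs := by
  by_cases h : c = "Last Price" <;> simp [pvFilter, h]

theorem foldl_pvStep_true (xs : List String) (acc : List String) :
    xs.foldl pvStep (acc, true) = (acc ++ pvFilter xs, true) := by
  induction xs generalizing acc with
  | nil => simp [pvFilter_nil]
  | cons c cs ih =>
    rw [pvFilter_cons]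
    by_cases h : c = "Last Price" <;>
      simp [pvStep, h, List.foldl_cons, ih]

theorem foldl_pvStep_no_odo (xs : List String) (acc : List String)
    (h : "Odometer" ∉ xs) :
    xs.foldl pvStep (acc, false) = (acc ++ pvFilter xs, false) := by
  induction xs generalizing acc with
  | nil => simp [pvFilter_nil]
  | cons c cs ih =>
    simp only [List.mem_cons, not_or] at h
    rw [pvFilter_cons]
    by_cases hlp : c = "Last Price"
    · simp [pvStep, hlp, List.foldl_cons, ih _ h.2]
    · have hco : ¬ c = "Odometer" := fun e => h.1 e.symm
      simp [pvStep, hlp, hco, List.foldl_cons, ih _ h.2]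

theorem foldl_pvStep_odo (xs : List String) (acc : List String)
    (h : "Odometer" ∈ xs) :
    xs.foldl pvStep (acc, false) = (acc ++ insAfterOdo (pvFilter xs), true) := by
  induction xs generalizing acc with
  | nil => simp at h
  | cons c cs ih =>
    rw [pvFilter_cons]
    by_cases ho : c = "Odometer"
    · subst ho
      simp [pvStep, insAfterOdo, List.foldl_cons, foldl_pvStep_true]
    · have hcs : "Odometer" ∈ cs := by
        rcases List.mem_cons.mp h with h' | h'
        · exact absurd h'.symm ho
        · exact h'
      by_cases hlp : c = "Last Price"
      · simp [pvStep, hlp, List.foldl_cons, ih _ hcs]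
      · simp [pvStep, hlp, ho, insAfterOdo, List.foldl_cons, ih _ hcs]

theorem insert_after_idx (cols : List String) (h : "Odometer" ∈ cols) :
    PySem.List.insert cols (((PySem.List.index? cols "Odometer").getD 0 + 1 : Nat) : Int) "Price"
      = insAfterOdo cols := by
  induction cols with
  | nil => simp at h
  | cons c cs ih =>
    by_cases ho : c = "Odometer"
    · subst ho
      rw [PySem.List.index?_cons_self]
      simp only [Option.getD_some, Nat.zero_add]
      rw [PySem.List.insert_natCast _ 1 _ (by simp)]
      simp [insAfterOdo]
    · have hcs : "Odometer" ∈ cs := by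
        rcases List.mem_cons.mp h with h' | h'
        · exact absurd h'.symm ho
        · exact h'
      rw [PySem.List.index?_cons_of_ne cs ho]
      obtain ⟨k, hk⟩ := Option.isSome_iff_exists.mp
        ((PySem.List.index?_isSome_iff cs "Odometer").mpr hcs)
      have hklen : k < cs.length := by
        obtain ⟨hlt, -, -⟩ := PySem.List.getElem_of_index?_eq_some hk
        exact hlt
      have ih' := ih hcs
      rw [hk] at ih' ⊢
      simp only [Option.map_some, Option.getD_some] at ih' ⊢
      rw [PySem.List.insert_natCast _ (k + 1 + 1) _ (by simp; omega)]
      rw [PySem.List.insert_natCast cs (k + 1) "Price" (by omega)] at ih'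
      simp only [List.take_succ_cons, List.drop_succ_cons, List.cons_append]
      rw [ih']
      simp [insAfterOdo, ho]

-- A's cols after the Price insertion, as one closed expression (zeta-reduced body of port A)
def pvIns (xs : List String) : List String :=
  PySem.List.insert (pvFilter xs)
    (((if "Odometer" ∈ pvFilter xs then (PySem.List.index? (pvFilter xs) "Odometer").getD 0 + 1
       else (pvFilter xs).length) : Nat) : Int) "Price"

theorem build_headers_py_char (xs : List String) (hlp : "Last Price" ∈ xs) :
    build_headers_py xs = (if "VIN" ∈ pvIns xs then pvIns xs else pvIns xs ++ ["VIN"]) := by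
  unfold build_headers_py
  rw [if_pos hlp]
  rfl

theorem build_headers_eq (xs : List String) :
    build_headers_py xs = build_headers_py_alt xs := by
  by_cases hlp : "Last Price" ∈ xs
  · rw [build_headers_py_char xs hlp]
    by_cases ho : "Odometer" ∈ pvFilter xs
    · have hoxs : "Odometer" ∈ xs :=
        List.mem_of_mem_filter (p := fun c => c ≠ "Last Price") ho
      have h1 : pvIns xs = insAfterOdo (pvFilter xs) := by
        unfold pvIns
        rw [if_pos ho]
        exact insert_after_idx _ ho
      have hB : build_headers_py_alt xs =
          (if "VIN" ∈ insAfterOdo (pvFilter xs) then insAfterOdo (pvFilter xs)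
           else insAfterOdo (pvFilter xs) ++ ["VIN"]) := by
        unfold build_headers_py_alt
        rw [if_neg (not_not_intro hlp), foldl_pvStep_odo xs [] hoxs]
        simp
      rw [h1, hB]
    · have hoxs : "Odometer" ∉ xs := fun hx =>
        ho (List.mem_filter.mpr ⟨hx, by decide⟩)
      have h1 : pvIns xs = pvFilter xs ++ ["Price"] := by
        unfold pvIns
        rw [if_neg ho]
        exact PySem.List.insert_length _ _
      have hB : build_headers_py_alt xs =
          (if "VIN" ∈ pvFilter xs ++ ["Price"] then pvFilter xs ++ ["Price"]
           else (pvFilter xs ++ ["Price"]) ++ ["VIN"]) := by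
        unfold build_headers_py_alt
        rw [if_neg (not_not_intro hlp), foldl_pvStep_no_odo xs [] hoxs]
        simp
      rw [h1, hB]
  · unfold build_headers_py build_headers_py_alt
    rw [if_neg hlp, if_pos hlp]

-- ===== VERDICT (by name: the statement is the Claim_ definition above) =====
theorem build_headers_py_spec : Claim_equal_build_headers_py := by
  intro xs _
  unfold Spec_build_headers_py
  exact build_headers_eq xs
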